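-- pv_equiv track=rewrite | github.com/xiaochou866/PaperCode | Algorithm/compareAlgorithm1.py | delEleWithAttrGroup
-- ===== SOURCE A (Python) =====
-- def delEleWithAttrGroup(T_p, attGroup) -> set[int]:
--     if len(T_p) == 0: return set()
--     delEle = []
--     for attr in T_p:
--         for group in attGroup:
--             if attr in group:
--                 delEle.extend(group)
--     return set(delEle)
-- ===== SOURCE B (Python) =====
-- def delEleWithAttrGroup(T_p, attGroup) -> set[int]:
--     # Build once: attr -> flat list of elements of every group containing attr.
--     idx = {}
--     for group in attGroup:
--         for a in dict.fromkeys(group):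
--             idx[a] = idx.get(a, []) + group
--     res = set()
--     for attr in T_p:
--         res.update(idx.get(attr, []))
--     return res
-- ===== Notes on version B (the rewrite author's own statement) =====
-- stated objective: alternative
-- what changed: Inverts the traversal: builds an attribute-to-elements index over attGroup once, then a single pass over T_p unions the indexed elements, replacing the per-attribute inner scan of all groups (measured ~2x at mid sizes, not confirmed >=1.5x at the largest size).
import Mathlib
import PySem

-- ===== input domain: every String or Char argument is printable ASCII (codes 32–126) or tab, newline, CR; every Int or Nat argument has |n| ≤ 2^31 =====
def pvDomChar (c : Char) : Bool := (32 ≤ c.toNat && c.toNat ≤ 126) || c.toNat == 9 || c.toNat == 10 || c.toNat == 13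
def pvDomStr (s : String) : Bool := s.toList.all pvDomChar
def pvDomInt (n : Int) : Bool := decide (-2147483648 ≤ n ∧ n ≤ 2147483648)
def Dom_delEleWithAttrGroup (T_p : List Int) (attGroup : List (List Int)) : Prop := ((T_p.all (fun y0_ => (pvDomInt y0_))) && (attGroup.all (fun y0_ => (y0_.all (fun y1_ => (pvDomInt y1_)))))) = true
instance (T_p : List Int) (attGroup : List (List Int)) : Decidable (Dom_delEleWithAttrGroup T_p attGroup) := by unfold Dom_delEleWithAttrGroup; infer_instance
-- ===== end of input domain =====

-- B inverts A's traversal: it builds an attribute→elements index over attGroup once,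
-- then one pass over T_p unions the indexed elements (objective: alternative — no inner scan per attribute).

-- ===== PORT A =====
def delEleWithAttrGroup (T_p : List Int) (attGroup : List (List Int)) : List Int :=
  if T_p.length = 0 then (PySem.Set.empty : PySem.Set Int)
  else
    let delEle : List Int := T_p.foldl (fun acc attr =>
      attGroup.foldl (fun acc group => if group.contains attr then acc ++ group else acc) acc) []
    PySem.Set.ofList delEle

-- ===== PORT B =====
-- idx = {}; for group in attGroup: for a in dict.fromkeys(group): idx[a] = idx.get(a, []) + group
def pvIndex (attGroup : List (List Int)) : PySem.Dict Int (List Int) :=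
  attGroup.foldl (fun d group =>
    (PySem.List.dedup group).foldl (fun d a => d.insert a (d.getD a [] ++ group)) d)
    PySem.Dict.empty

-- res = set(); for attr in T_p: res.update(idx.get(attr, []))
def delEleWithAttrGroup_alt (T_p : List Int) (attGroup : List (List Int)) : List Int :=
  let idx := pvIndex attGroup
  T_p.foldl (fun res attr => PySem.Set.update res (idx.getD attr [])) (PySem.Set.empty : PySem.Set Int)

-- ===== PRECONDITION & SPEC =====
def Spec_delEleWithAttrGroup (T_p : List Int) (attGroup : List (List Int)) (out : List Int) : Prop := out = delEleWithAttrGroup_alt T_p attGroup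
instance (T_p : List Int) (attGroup : List (List Int)) (out : List Int) : Decidable (Spec_delEleWithAttrGroup T_p attGroup out) := by unfold Spec_delEleWithAttrGroup; infer_instance

-- ===== CLAIM (what is proved, stated in full; the proofs are below) =====
def Claim_equal_delEleWithAttrGroup : Prop := ∀ (T_p : List Int) (attGroup : List (List Int)), Dom_delEleWithAttrGroup T_p attGroup → Spec_delEleWithAttrGroup T_p attGroup (delEleWithAttrGroup T_p attGroup)

-- ===== LEMMAS AND PROOFS =====

-- the per-attribute contribution: all elements of the groups containing the attribute
def pvContrib (attGroup : List (List Int)) (attr : Int) : List Int :=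
  (attGroup.filter (fun g => g.contains attr)).flatten

-- B's inner index-building loop, on a duplicate-free key list
lemma pv_inner_getD (g : List Int) (l : List Int) (hl : l.Nodup)
    (d : PySem.Dict Int (List Int)) (a : Int) :
    (l.foldl (fun d b => d.insert b (d.getD b [] ++ g)) d).getD a [] =
      if a ∈ l then d.getD a [] ++ g else d.getD a [] := by
  induction l generalizing d with
  | nil => simp
  | cons b t ih =>
    rw [List.foldl_cons, ih (List.Nodup.of_cons hl)]
    by_cases hab : a = b
    · subst hab
      have hat : a ∉ t := (List.nodup_cons.mp hl).1
      simp [hat, PySem.Dict.getD_insert_self]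
    · simp [PySem.Dict.getD_insert, hab]

-- the index maps each attribute to the concatenation of the groups containing it
lemma pv_index_getD (gs : List (List Int)) (a : Int) :
    (pvIndex gs).getD a [] = pvContrib gs a := by
  suffices h : ∀ (d : PySem.Dict Int (List Int)),
      (gs.foldl (fun d group =>
        (PySem.List.dedup group).foldl (fun d a => d.insert a (d.getD a [] ++ group)) d) d).getD a []
        = d.getD a [] ++ pvContrib gs a by
    simpa [pvIndex] using h PySem.Dict.empty
  induction gs with
  | nil => intro d; simp [pvContrib]
  | cons g t ih =>
    intro d
    rw [List.foldl_cons, ih, pv_inner_getD g _ (PySem.List.nodup_dedup g)]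
    by_cases hag : a ∈ g
    · simp [pvContrib, hag]
    · simp [pvContrib, hag]

-- A's inner loop: conditional extend = flatten of the matching groups
lemma pv_a_inner (gs : List (List Int)) (attr : Int) (acc : List Int) :
    gs.foldl (fun acc group => if group.contains attr then acc ++ group else acc) acc
      = acc ++ pvContrib gs attr := by
  induction gs generalizing acc with
  | nil => simp [pvContrib]
  | cons g t ih =>
    rw [List.foldl_cons, ih]
    by_cases h : attr ∈ g
    · simp [pvContrib, h]
    · simp [pvContrib, h]

-- B's output loop: set-update over per-attribute contributions = set of the concatenation
lemma pv_update_foldl (f : Int → List Int) (T : List Int) (s : PySem.Set Int) :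
    T.foldl (fun res attr => PySem.Set.update res (f attr)) s
      = (T.flatMap f).foldl PySem.Set.add s := by
  induction T generalizing s with
  | nil => simp
  | cons a t ih =>
    rw [List.foldl_cons, ih, List.flatMap_cons, List.foldl_append]
    rfl

-- ===== VERDICT (by name: the statement is the Claim_ definition above) =====
theorem delEleWithAttrGroup_spec : Claim_equal_delEleWithAttrGroup := by
  intro T_p attGroup _
  show delEleWithAttrGroup T_p attGroup = delEleWithAttrGroup_alt T_p attGroup
  unfold delEleWithAttrGroup delEleWithAttrGroup_alt
  have hidx : ∀ a : Int, (pvIndex attGroup).getD a [] = pvContrib attGroup a :=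
    pv_index_getD attGroup
  have hB : T_p.foldl (fun res attr => PySem.Set.update res ((pvIndex attGroup).getD attr []))
      (PySem.Set.empty : PySem.Set Int)
      = (T_p.flatMap (pvContrib attGroup)).foldl PySem.Set.add (PySem.Set.empty : PySem.Set Int) := by
    rw [show (fun res attr => PySem.Set.update res ((pvIndex attGroup).getD attr []))
        = fun res attr => PySem.Set.update res (pvContrib attGroup attr) from funext fun res => funext fun attr => by rw [hidx]]
    exact pv_update_foldl _ _ _
  have hA : T_p.foldl (fun acc attr =>
      attGroup.foldl (fun acc group => if group.contains attr then acc ++ group else acc) acc) ([] : List Int)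
      = T_p.flatMap (pvContrib attGroup) := by
    rw [show (fun acc attr =>
        attGroup.foldl (fun acc group => if group.contains attr then acc ++ group else acc) acc)
        = fun (acc : List Int) attr => acc ++ pvContrib attGroup attr from funext fun acc => funext fun attr => pv_a_inner attGroup attr acc]
    simpa using PySem.List.foldl_append_eq_flatMap (pvContrib attGroup) T_p ([] : List Int)
  cases T_p with
  | nil => rfl
  | cons x t =>
    simp only [List.length_cons, hB]
    rw [if_neg (by omega)]
    simp only [hA]
    rfl
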